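-- pv_equiv track=rewrite | github.com/ChrisSavoie16/CSI4506-Projet | backtrack/Backtrack.py | is_valid_assignment
-- ===== SOURCE A (Python) =====
-- def is_valid_assignment(solution, row, column):
--     """
--     Checks if the assigned number in the solution space is valid
--     :param solution: the solution space
--     :param row: row assigned
--     :param column: column assigned
--     :return: boolean
--     """
--     for i in range(9):
--         if i != column and solution[row][i] != 0 and solution[row][i] == solution[row][column]:
--             return False
--
--     for j in range(9):
--         if j != row and solution[j][column] != 0 and solution[j][column] == solution[row][column]:
--             return False
--
--     box_row = row // 3
--     box_column = column // 3
--     for i in range(3):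
--         for j in range(3):
--             compare_row = 3 * box_row + i
--             compare_column = 3 * box_column + j
--             if (compare_row != row
--                and compare_column != column
--                and solution[compare_row][compare_column] != 0
--                and solution[compare_row][compare_column] == solution[row][column]):
--                 return False
--     return True
-- ===== SOURCE B (Python) =====
-- def _is_peer(r, c, row, column):
--     if r == row:
--         return c != column
--     if c == column:
--         return True
--     return r // 3 == row // 3 and c // 3 == column // 3 and c != column
--
-- def is_valid_assignment(solution, row, column):
--     v = solution[row][column]
--     if v == 0:
--         return True
--     for r, cells in enumerate(solution[:9]):
--         for c, x in enumerate(cells[:9]):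
--             if x == v and _is_peer(r, c, row, column):
--                 return False
--     return True
-- ===== Notes on version B (the rewrite author's own statement) =====
-- stated objective: alternative
-- what changed: B replaces A's three separate guarded scan loops (row, column, box, each with its own exclusion-and-return logic) by one uniform pass over all 81 grid cells with a single peer predicate (same row / same column / same box), after an early True return when the target cell is 0.
-- outside the precondition, e.g. on is_valid_assignment([[-1, -3, -1], [9, -3]], -1, -2): A returns False, B returns True
import Mathlib
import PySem

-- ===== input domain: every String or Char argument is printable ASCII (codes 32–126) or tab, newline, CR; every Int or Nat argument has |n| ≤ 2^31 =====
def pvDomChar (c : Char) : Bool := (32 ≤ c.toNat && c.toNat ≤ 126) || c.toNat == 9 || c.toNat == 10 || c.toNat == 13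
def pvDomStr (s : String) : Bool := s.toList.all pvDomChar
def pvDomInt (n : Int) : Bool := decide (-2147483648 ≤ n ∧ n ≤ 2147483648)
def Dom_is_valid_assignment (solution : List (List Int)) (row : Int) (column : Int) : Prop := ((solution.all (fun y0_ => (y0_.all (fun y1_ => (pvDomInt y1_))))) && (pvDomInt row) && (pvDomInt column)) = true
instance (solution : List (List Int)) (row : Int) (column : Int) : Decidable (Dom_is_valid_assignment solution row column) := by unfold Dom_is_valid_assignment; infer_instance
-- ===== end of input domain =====

-- B replaces A's three guarded scan loops (row, column, box) by one uniform pass over all 81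
-- cells with a single peer predicate, after an early True return for an empty target cell
-- (objective: alternative decomposition; same cost).

-- solution[r][c] with Python index semantics; the `getD` defaults are only reached where the
-- Python raises IndexError, which Pre_ excludes.
def pvCell (s : List (List Int)) (r c : Int) : Int :=
  (PySem.List.pyGet? ((PySem.List.pyGet? s r).getD []) c).getD 0

-- ===== PORT A =====
def is_valid_assignment (solution : List (List Int)) (row : Int) (column : Int) : Bool :=
  if (PySem.List.pyRange 0 9 1).any (fun i =>
       i != column && pvCell solution row i != 0 &&
         pvCell solution row i == pvCell solution row column) then false
  else if (PySem.List.pyRange 0 9 1).any (fun j =>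
       j != row && pvCell solution j column != 0 &&
         pvCell solution j column == pvCell solution row column) then false
  else if (PySem.List.pyRange 0 3 1).any (fun i =>
         (PySem.List.pyRange 0 3 1).any (fun j =>
           3 * PySem.Int.floordiv row 3 + i != row &&
             3 * PySem.Int.floordiv column 3 + j != column &&
             pvCell solution (3 * PySem.Int.floordiv row 3 + i) (3 * PySem.Int.floordiv column 3 + j) != 0 &&
             pvCell solution (3 * PySem.Int.floordiv row 3 + i) (3 * PySem.Int.floordiv column 3 + j) ==
               pvCell solution row column))
  then false
  else true

-- ===== PORT B =====
-- B's helper _is_peer, transcribed branch for branch.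
def pvIsPeer (r c row column : Int) : Bool :=
  if r == row then c != column
  else if c == column then true
  else PySem.Int.floordiv r 3 == PySem.Int.floordiv row 3 &&
         PySem.Int.floordiv c 3 == PySem.Int.floordiv column 3 && c != column

def is_valid_assignment_alt (solution : List (List Int)) (row : Int) (column : Int) : Bool :=
  let v := pvCell solution row column
  if v == 0 then true
  else if (PySem.List.enumerate (PySem.List.slice solution none (some 9)) 0).any (fun rc =>
            (PySem.List.enumerate (PySem.List.slice rc.2 none (some 9)) 0).any (fun cx =>
              cx.2 == v && pvIsPeer rc.1 cx.1 row column)) then false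
  else true

-- ===== PRECONDITION & SPEC =====
-- Pre_ admits (1) well-formed boards (at least 9 rows of at least 9 cells, in-range indices,
-- negative in-range indices only with target cell 0), and malformed boards on which A
-- short-circuits to False before any out-of-range access: (2) a conflicting nonzero duplicate
-- in the scanned part of the target row, or (3) a clean target row and a conflicting nonzero
-- duplicate in a fully readable target column.  It excludes negative in-range indices with a
-- nonzero target cell: Sudoku coordinates are 0-8, and there which peer cells A's scans visit
-- under Python's wraparound (the cell can be compared against itself) is accidental, a corner
-- no specification fixes.
def Pre_is_valid_assignment (solution : List (List Int)) (row : Int) (column : Int) : Prop :=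
  (9 ≤ solution.length ∧ (∀ r ∈ solution, 9 ≤ r.length) ∧
     -9 ≤ row ∧ row < 9 ∧ -9 ≤ column ∧ column < 9 ∧
     ((0 ≤ row ∧ 0 ≤ column) ∨ pvCell solution row column = 0))
  ∨ (∃ rl ∈ (PySem.List.pyGet? solution row).toList,
       ∃ v ∈ (PySem.List.pyGet? rl column).toList, v ≠ 0 ∧ 0 ≤ row ∧ row < 9 ∧
         ∃ i ∈ List.range 9, i < rl.length ∧ (i : Int) ≠ column ∧ rl.getD i 0 = v)
  ∨ (∃ rl ∈ (PySem.List.pyGet? solution row).toList,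
       ∃ v ∈ (PySem.List.pyGet? rl column).toList, v ≠ 0 ∧ 0 ≤ column ∧ column < 9 ∧
         9 ≤ rl.length ∧
         (∀ i ∈ List.range 9, (i : Int) ≠ column → rl.getD i 0 = 0 ∨ rl.getD i 0 ≠ v) ∧
         (∀ j ∈ List.range 9, (j : Int) ≠ row →
            j < solution.length ∧ column < ((solution.getD j []).length : Int)) ∧
         ∃ j ∈ List.range 9, (j : Int) ≠ row ∧ j < solution.length ∧
           column < ((solution.getD j []).length : Int) ∧
           (solution.getD j []).getD column.toNat 0 = v)
instance (solution : List (List Int)) (row : Int) (column : Int) : Decidable (Pre_is_valid_assignment solution row column) := by unfold Pre_is_valid_assignment; infer_instance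

def pvWitness_is_valid_assignment : List (List Int) × Int × Int :=
  ([[5,3,0,0,7,0,0,0,0],[6,0,0,1,9,5,0,0,0],[0,9,8,0,0,0,0,6,0],
    [8,0,0,0,6,0,0,0,3],[4,0,0,8,0,3,0,0,1],[7,0,0,0,2,0,0,0,6],
    [0,6,0,0,0,0,2,8,0],[0,0,0,4,1,9,0,0,5],[0,0,0,0,8,0,0,7,9]], 0, 2)

def Spec_is_valid_assignment (solution : List (List Int)) (row : Int) (column : Int) (out : Bool) : Prop := out = is_valid_assignment_alt solution row column
instance (solution : List (List Int)) (row : Int) (column : Int) (out : Bool) : Decidable (Spec_is_valid_assignment solution row column out) := by unfold Spec_is_valid_assignment; infer_instance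

-- ===== CLAIM (what is proved, stated in full; the proofs are below) =====
def Claim_equal_is_valid_assignment : Prop := ∀ (solution : List (List Int)) (row : Int) (column : Int), Dom_is_valid_assignment solution row column → Pre_is_valid_assignment solution row column → Spec_is_valid_assignment solution row column (is_valid_assignment solution row column)

-- ===== LEMMAS AND PROOFS =====

-- characterisation of B's peer predicate in terms of `/` (Int.ediv, = floor for divisor 3)
theorem pvIsPeer_iff (r c row column : Int) :
    pvIsPeer r c row column = true ↔
      (r = row ∧ c ≠ column) ∨ (r ≠ row ∧ c = column) ∨
        (r ≠ row ∧ c ≠ column ∧ r / 3 = row / 3 ∧ c / 3 = column / 3) := by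
  unfold pvIsPeer
  simp only [PySem.Int.floordiv_eq_ediv_of_pos (show (0:Int) < 3 by norm_num)]
  by_cases h1 : r = row <;> by_cases h2 : c = column <;> simp [h1, h2]

-- a valid lookup pins down pvCell's value
theorem pvCell_of_lookup (s : List (List Int)) (r c : Int) (rl : List Int) (v : Int)
    (h1 : PySem.List.pyGet? s r = some rl) (h2 : PySem.List.pyGet? rl c = some v) :
    pvCell s r c = v := by
  unfold pvCell; rw [h1, Option.getD_some, h2, Option.getD_some]

-- a successful pyGet? at a nonnegative index is getD at its toNat
theorem pvLookup_getD (s : List (List Int)) (r : Int) (rl : List Int) (h0 : 0 ≤ r)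
    (h : PySem.List.pyGet? s r = some rl) :
    r.toNat < s.length ∧ s.getD r.toNat [] = rl := by
  have hin : PySem.Raise.InRange s.length r := by
    by_contra hcon
    rw [← PySem.List.pyGet?_eq_none_iff (xs := s) (i := r)] at hcon
    simp [hcon] at h
  unfold PySem.Raise.InRange at hin
  have hlt : r.toNat < s.length := by omega
  refine ⟨hlt, ?_⟩
  rw [PySem.List.pyGet?_eq_some_getElem (xs := s) (i := r) h0 (by omega)] at h
  rw [List.getD_eq_getElem _ _ hlt]
  exact Option.some_inj.mp h

-- reading an in-bounds cell through pvCell is plain double getD indexing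
theorem pvCell_eq_getD (s : List (List Int)) (r c : Int) (h0r : 0 ≤ r)
    (hr : r.toNat < s.length) (h0c : 0 ≤ c) (hc : c.toNat < (s.getD r.toNat []).length) :
    pvCell s r c = (s.getD r.toNat []).getD c.toNat 0 := by
  unfold pvCell
  rw [PySem.List.pyGet?_eq_some_getElem (xs := s) (i := r) h0r (by omega), Option.getD_some]
  rw [← List.getD_eq_getElem s [] hr]
  rw [PySem.List.pyGet?_eq_some_getElem (xs := s.getD r.toNat []) (i := c) h0c (by omega),
      Option.getD_some]
  rw [List.getD_eq_getElem _ _ hc]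

-- `any` over an enumerate is an indexed existential
theorem pvAnyEnum {α : Type} (xs : List α) (d : α) (f : Int × α → Bool) :
    ((PySem.List.enumerate xs 0).any f = true)
      ↔ ∃ k : Nat, k < xs.length ∧ f ((k : Int), xs.getD k d) = true := by
  simp only [List.any_eq_true, PySem.List.mem_enumerate_iff]
  constructor
  · rintro ⟨p, ⟨k, hk, rfl⟩, hq⟩
    refine ⟨k, hk, ?_⟩
    rw [List.getD_eq_getElem _ _ hk]
    simpa using hq
  · rintro ⟨k, hk, hq⟩
    refine ⟨((k : Int), xs[k]), ⟨k, hk, by simp⟩, ?_⟩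
    rw [List.getD_eq_getElem _ _ hk] at hq
    simpa using hq

-- getD through a clipping take
theorem pvTakeGetD {α : Type} (xs : List α) (n k : Nat) (d : α) (h : k < n) :
    (xs.take n).getD k d = xs.getD k d := by
  rcases Nat.lt_or_ge k xs.length with hk | hk
  · rw [List.getD_eq_getElem _ _ (by simp [List.length_take]; omega),
        List.getD_eq_getElem _ _ hk]
    exact List.getElem_take
  · rw [List.getD_eq_default _ _ (by simp [List.length_take]; omega),
        List.getD_eq_default _ _ (by omega)]

-- B's clipped grid sweep finds a hit exactly at some in-bounds cell of the 9×9 window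
theorem pvBAny_iff (solution : List (List Int)) (q : Int → Int → Int → Bool) :
    ((PySem.List.enumerate (PySem.List.slice solution none (some 9)) 0).any (fun rc =>
        (PySem.List.enumerate (PySem.List.slice rc.2 none (some 9)) 0).any (fun cx =>
          q rc.1 cx.1 cx.2)) = true)
      ↔ ∃ r : Nat, r < solution.length ∧ r < 9 ∧ ∃ c : Nat,
          c < (solution.getD r []).length ∧ c < 9 ∧
            q r c ((solution.getD r []).getD c 0) = true := by
  rw [PySem.List.slice_to _ (by norm_num), pvAnyEnum _ []]
  constructor
  · rintro ⟨k, hk, hq⟩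
    simp only [List.length_take, lt_min_iff] at hk
    rw [pvTakeGetD _ _ _ _ (by omega)] at hq
    rw [PySem.List.slice_to _ (by norm_num), pvAnyEnum _ 0] at hq
    obtain ⟨m, hm, hq⟩ := hq
    simp only [List.length_take, lt_min_iff] at hm
    rw [pvTakeGetD _ _ _ _ (by omega)] at hq
    exact ⟨k, hk.2, by omega, m, hm.2, by omega, hq⟩
  · rintro ⟨r, hr, hr9, c, hc, hc9, hq⟩
    refine ⟨r, by simp only [List.length_take]; omega, ?_⟩
    rw [pvTakeGetD _ _ _ _ (by omega)]
    rw [PySem.List.slice_to _ (by norm_num), pvAnyEnum _ 0]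
    refine ⟨c, by simp only [List.length_take]; omega, ?_⟩
    rw [pvTakeGetD _ _ _ _ (by omega)]
    exact hq

-- on a well-formed board B's sweep is the double index scan of the 9×9 window
theorem pvBAny_eq_grid (solution : List (List Int)) (q : Int → Int → Int → Bool)
    (hl : 9 ≤ solution.length) (hrl : ∀ r ∈ solution, 9 ≤ r.length) :
    ((PySem.List.enumerate (PySem.List.slice solution none (some 9)) 0).any (fun rc =>
        (PySem.List.enumerate (PySem.List.slice rc.2 none (some 9)) 0).any (fun cx =>
          q rc.1 cx.1 cx.2)))
      = ((PySem.List.pyRange 0 9 1).any (fun r =>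
          (PySem.List.pyRange 0 9 1).any (fun c => q r c (pvCell solution r c)))) := by
  rw [Bool.eq_iff_iff, pvBAny_iff]
  simp only [List.any_eq_true, PySem.List.mem_pyRange_one]
  constructor
  · rintro ⟨r, hr, hr9, c, hc, hc9, hq⟩
    refine ⟨(r : Int), ⟨by positivity, by exact_mod_cast hr9⟩,
      (c : Int), ⟨by positivity, by exact_mod_cast hc9⟩, ?_⟩
    rw [pvCell_eq_getD solution r c (by positivity) (by simpa using hr)
      (by positivity) (by simpa using hc)]
    simpa using hq
  · rintro ⟨r, ⟨hr0, hr9⟩, c, ⟨hc0, hc9⟩, hq⟩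
    have hrlen : r.toNat < solution.length := by omega
    have hclen : c.toNat < (solution.getD r.toNat []).length := by
      have := hrl (solution.getD r.toNat []) (by rw [List.getD_eq_getElem _ _ hrlen]; exact List.getElem_mem hrlen)
      omega
    refine ⟨r.toNat, hrlen, by omega, c.toNat, hclen, by omega, ?_⟩
    rw [← pvCell_eq_getD solution r c hr0 hrlen hc0 hclen]
    rw [Int.toNat_of_nonneg hr0, Int.toNat_of_nonneg hc0]
    exact hq

-- with a nonzero target cell in the 0–8 range, A's three conflict scans together find a
-- conflict exactly when B's single sweep of the 9×9 window does
theorem pvUnion_eq (solution : List (List Int)) (row column : Int)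
    (hr0 : 0 ≤ row) (hr9 : row < 9) (hc0 : 0 ≤ column) (hc9 : column < 9)
    (hv : pvCell solution row column ≠ 0) :
    ((PySem.List.pyRange 0 9 1).any (fun i =>
       i != column && pvCell solution row i != 0 &&
         pvCell solution row i == pvCell solution row column) ||
     (PySem.List.pyRange 0 9 1).any (fun j =>
       j != row && pvCell solution j column != 0 &&
         pvCell solution j column == pvCell solution row column) ||
     (PySem.List.pyRange 0 3 1).any (fun i =>
       (PySem.List.pyRange 0 3 1).any (fun j =>
         3 * PySem.Int.floordiv row 3 + i != row &&
           3 * PySem.Int.floordiv column 3 + j != column &&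
           pvCell solution (3 * PySem.Int.floordiv row 3 + i) (3 * PySem.Int.floordiv column 3 + j) != 0 &&
           pvCell solution (3 * PySem.Int.floordiv row 3 + i) (3 * PySem.Int.floordiv column 3 + j) ==
             pvCell solution row column)))
    = (PySem.List.pyRange 0 9 1).any (fun r =>
        (PySem.List.pyRange 0 9 1).any (fun c =>
          pvCell solution r c == pvCell solution row column && pvIsPeer r c row column)) := by
  simp only [PySem.Int.floordiv_eq_ediv_of_pos (show (0:Int) < 3 by norm_num)]
  rw [Bool.eq_iff_iff]
  simp only [Bool.or_eq_true, List.any_eq_true, PySem.List.mem_pyRange_one,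
    Bool.and_eq_true, bne_iff_ne, ne_eq, beq_iff_eq, pvIsPeer_iff]
  constructor
  · rintro ((⟨i, ⟨hi0, hi9⟩, ⟨hic, h0⟩, he⟩ | ⟨j, hjm, ⟨hjr, h0⟩, he⟩) |
      ⟨i, ⟨hi0, hi3⟩, j, ⟨hj0, hj3⟩, ⟨⟨hcr, hcc⟩, h0⟩, he⟩)
    · exact ⟨row, ⟨hr0, hr9⟩, i, ⟨hi0, hi9⟩, he, Or.inl ⟨rfl, hic⟩⟩
    · exact ⟨j, hjm, column, ⟨hc0, hc9⟩, he, Or.inr (Or.inl ⟨hjr, rfl⟩)⟩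
    · exact ⟨3 * (row / 3) + i, ⟨by omega, by omega⟩, 3 * (column / 3) + j,
        ⟨by omega, by omega⟩, he, Or.inr (Or.inr ⟨hcr, hcc, by omega, by omega⟩)⟩
  · rintro ⟨r, hrm, c, hcm, he, (⟨rfl, hne⟩ | ⟨hne, rfl⟩ | ⟨hner, hnec, hbr, hbc⟩)⟩
    · exact Or.inl (Or.inl ⟨c, hcm, ⟨hne, by rw [he]; exact hv⟩, he⟩)
    · exact Or.inl (Or.inr ⟨r, hrm, ⟨hne, by rw [he]; exact hv⟩, he⟩)
    · obtain ⟨hr0', hr9'⟩ := hrm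
      obtain ⟨hc0', hc9'⟩ := hcm
      have hr' : 3 * (row / 3) + (r - 3 * (row / 3)) = r := by omega
      have hc' : 3 * (column / 3) + (c - 3 * (column / 3)) = c := by omega
      refine Or.inr ⟨r - 3 * (row / 3), ⟨by omega, by omega⟩,
        c - 3 * (column / 3), ⟨by omega, by omega⟩, ⟨⟨?_, ?_⟩, ?_⟩, ?_⟩
      · rw [hr']; exact hner
      · rw [hc']; exact hnec
      · rw [hr', hc', he]; exact hv
      · rw [hr', hc']; exact he

-- A's early-return if-chain is the single test on the disjunction of its three scans
theorem pvIfChain (b1 b2 b3 : Bool) :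
    (if b1 then false else if b2 then false else if b3 then false else true)
      = (if (b1 || b2 || b3) then false else true) := by
  cases b1 <;> cases b2 <;> cases b3 <;> rfl

-- A returns False as soon as its row scan has a hit
theorem pvA_false_of_row_hit (solution : List (List Int)) (row column : Int) (i : Int)
    (h0 : 0 ≤ i) (h9 : i < 9) (hic : i ≠ column)
    (hnz : pvCell solution row i ≠ 0)
    (heq : pvCell solution row i = pvCell solution row column) :
    is_valid_assignment solution row column = false := by
  unfold is_valid_assignment
  have h1 : (PySem.List.pyRange 0 9 1).any (fun i =>
      i != column && pvCell solution row i != 0 &&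
        pvCell solution row i == pvCell solution row column) = true := by
    rw [List.any_eq_true]
    exact ⟨i, by rw [PySem.List.mem_pyRange_one]; omega, by simp [hic, heq]; exact heq ▸ hnz⟩
  rw [h1]; rfl

-- A returns False as soon as its column scan has a hit
theorem pvA_false_of_col_hit (solution : List (List Int)) (row column : Int) (j : Int)
    (h0 : 0 ≤ j) (h9 : j < 9) (hjr : j ≠ row)
    (hnz : pvCell solution j column ≠ 0)
    (heq : pvCell solution j column = pvCell solution row column) :
    is_valid_assignment solution row column = false := by
  unfold is_valid_assignment
  have h2 : (PySem.List.pyRange 0 9 1).any (fun j =>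
      j != row && pvCell solution j column != 0 &&
        pvCell solution j column == pvCell solution row column) = true := by
    rw [List.any_eq_true]
    exact ⟨j, by rw [PySem.List.mem_pyRange_one]; omega, by simp [hjr, heq]; exact heq ▸ hnz⟩
  rw [pvIfChain, h2]
  simp

-- B returns False as soon as one in-window cell holds the (nonzero) target value at a peer position
theorem pvB_false_of_hit (solution : List (List Int)) (row column : Int)
    (hv : pvCell solution row column ≠ 0)
    (r c : Nat) (hr : r < solution.length) (hr9 : r < 9)
    (hc : c < (solution.getD r []).length) (hc9 : c < 9)
    (hval : (solution.getD r []).getD c 0 = pvCell solution row column)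
    (hpeer : pvIsPeer r c row column = true) :
    is_valid_assignment_alt solution row column = false := by
  unfold is_valid_assignment_alt
  rw [if_neg (by simpa using hv), if_pos]
  exact (pvBAny_iff solution
    (fun r c x => x == pvCell solution row column && pvIsPeer r c row column)).mpr
    ⟨r, hr, hr9, c, hc, hc9, by simp only [hval, hpeer, beq_self_eq_true, Bool.and_self]⟩

-- the two ports agree on every input satisfying Pre_
theorem pv_eq_on_pre (solution : List (List Int)) (row column : Int)
    (hp : Pre_is_valid_assignment solution row column) :
    is_valid_assignment solution row column = is_valid_assignment_alt solution row column := by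
  rcases hp with ⟨hl, hrl, hrlo, hrhi, hclo, hchi, hrest⟩ | h2 | h3
  · by_cases hv : pvCell solution row column = 0
    · -- target cell is 0: B returns true at its early test; A's scans all fail, since each
      -- requires a cell that is nonzero and equal to 0
      unfold is_valid_assignment is_valid_assignment_alt
      simp only [hv]
      norm_num
    · obtain ⟨hr0, hc0⟩ := hrest.resolve_right hv
      have hv' : (pvCell solution row column == 0) = false := by simpa using hv
      unfold is_valid_assignment is_valid_assignment_alt
      simp only [hv', Bool.false_eq_true, if_false]
      rw [pvIfChain]
      rw [pvUnion_eq solution row column hr0 hrhi hc0 hchi hv]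
      have hgrid := pvBAny_eq_grid solution
        (fun r c x => x == pvCell solution row column && pvIsPeer r c row column) hl hrl
      simp only at hgrid
      rw [hgrid]
  · -- a conflicting duplicate in the scanned part of the target row: both ports return False
    obtain ⟨rl, hrlm, v, hvm, hvne, hr0, hr9, i, hi9m, hil, hic, hival⟩ := h2
    have hi9 : i < 9 := List.mem_range.mp hi9m
    simp only [Option.mem_toList] at hrlm hvm
    have hcell : pvCell solution row column = v := pvCell_of_lookup _ _ _ _ _ hrlm hvm
    obtain ⟨hrlen, hrowl⟩ := pvLookup_getD solution row rl hr0 hrlm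
    have hAvne : pvCell solution row column ≠ 0 := by rw [hcell]; exact hvne
    have hArow : pvCell solution row (i : Int) = v := by
      rw [pvCell_eq_getD solution row i hr0 hrlen (by positivity)
        (by rw [hrowl]; simpa using hil)]
      rw [Int.toNat_natCast, hrowl, hival]
    rw [pvA_false_of_row_hit solution row column i (by positivity) (by exact_mod_cast hi9)
      hic (by rw [hArow]; exact hvne) (by rw [hArow, hcell])]
    refine (pvB_false_of_hit solution row column hAvne row.toNat i hrlen (by omega)
      (by rw [hrowl]; exact hil) hi9 ?_ ?_).symm
    · rw [hrowl, hival, hcell]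
    · unfold pvIsPeer
      rw [if_pos (by simp [Int.toNat_of_nonneg hr0])]
      simpa using hic
  · -- a clean target row and a conflicting duplicate in the target column: both ports return False
    obtain ⟨rl, hrlm, v, hvm, hvne, hc0, hc9, _, _, _, j, hj9m, hjr, hjl, hcl, hjval⟩ := h3
    have hj9 : j < 9 := List.mem_range.mp hj9m
    simp only [Option.mem_toList] at hrlm hvm
    have hcell : pvCell solution row column = v := pvCell_of_lookup _ _ _ _ _ hrlm hvm
    have hAvne : pvCell solution row column ≠ 0 := by rw [hcell]; exact hvne
    have hclen : column.toNat < (solution.getD j []).length := by omega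
    have hAcol : pvCell solution (j : Int) column = v := by
      rw [pvCell_eq_getD solution j column (by positivity) (by simpa using hjl) hc0
        (by simpa using hclen)]
      rw [Int.toNat_natCast]
      exact hjval
    rw [pvA_false_of_col_hit solution row column j (by positivity) (by exact_mod_cast hj9)
      hjr (by rw [hAcol]; exact hvne) (by rw [hAcol, hcell])]
    refine (pvB_false_of_hit solution row column hAvne j column.toNat hjl hj9 hclen (by omega) ?_ ?_).symm
    · rw [hjval, hcell]
    · unfold pvIsPeer
      rw [if_neg (by simpa using hjr)]
      rw [if_pos (by simp [Int.toNat_of_nonneg hc0])]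

-- ===== VERDICT (by name: the statement is the Claim_ definition above) =====
theorem is_valid_assignment_spec : Claim_equal_is_valid_assignment := by
  intro solution row column _ hp
  exact pv_eq_on_pre solution row column hp
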